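-- pv_equiv track=rewrite | github.com/neolee/neb | ocr_proofreader.py | _line_start_index
-- ===== SOURCE A (Python) =====
-- class EditApplyError(RuntimeError):
--     """Raised when edits cannot be applied cleanly."""
--
-- def _line_start_index(text: str, line: int) -> int:
--     if line < 1:
--         raise EditApplyError(f"行号（line={line}）必须大于等于 1")
--     if line == 1:
--         return 0
--
--     current_line = 1
--     index = 0
--     length = len(text)
--     while current_line < line:
--         newline = text.find("\n", index)
--         if newline == -1:
--             if current_line + 1 == line:
--                 return length
--             raise EditApplyError(f"行号（line={line}）超出原文范围")
--         index = newline + 1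
--         current_line += 1
--     return index
-- ===== SOURCE B (Python) =====
-- class EditApplyError(RuntimeError):
--     """Raised when edits cannot be applied cleanly."""
--
-- def _line_start_index(text: str, line: int) -> int:
--     if line < 1:
--         raise EditApplyError(f"行号（line={line}）必须大于等于 1")
--     starts = [0]
--     for i, ch in enumerate(text):
--         if ch == "\n":
--             starts.append(i + 1)
--     starts.append(len(text))
--     if len(starts) < line:
--         raise EditApplyError(f"行号（line={line}）超出原文范围")
--     return starts[line - 1]
-- ===== Notes on version B (the rewrite author's own statement) =====
-- stated objective: simpler
-- what changed: B builds the list of line-start offsets in one enumerate pass (plus a final len(text) sentinel) and answers with a single list index, instead of A's while loop that repeatedly calls text.find with line and index counters.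
import Mathlib
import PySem

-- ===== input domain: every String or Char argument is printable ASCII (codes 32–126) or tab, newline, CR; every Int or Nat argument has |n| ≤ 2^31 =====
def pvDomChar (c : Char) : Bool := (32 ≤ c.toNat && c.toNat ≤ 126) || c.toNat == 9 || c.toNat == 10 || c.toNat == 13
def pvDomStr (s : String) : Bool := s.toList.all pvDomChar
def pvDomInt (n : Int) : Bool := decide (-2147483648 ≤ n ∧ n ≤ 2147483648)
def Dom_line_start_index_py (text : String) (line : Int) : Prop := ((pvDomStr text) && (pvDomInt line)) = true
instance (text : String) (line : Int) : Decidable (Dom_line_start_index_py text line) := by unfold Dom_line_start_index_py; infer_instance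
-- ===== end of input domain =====

-- B replaces A's repeated text.find scan with line/index counters by building the table
-- of line-start offsets in one enumerate pass and indexing it once (objective: simpler).
-- Return-value equivalence; both raise the same messages on the same inputs (outside Pre_).

-- ===== PORT A =====
-- A's while loop: fuel = (line - current_line).toNat, so fuel = 0 iff the loop condition
-- current_line < line fails; the raise branch returns the junk value 0 (outside Pre_).
def lsiLoop (cs : List Char) (line : Int) : Nat → Int → Int → Int
  | 0, _currentLine, index => index
  | fuel + 1, currentLine, index =>
    let newline := PySem.Chars.findFrom cs ['\n'] index
    if newline = -1 then
      if currentLine + 1 = line then (cs.length : Int) else 0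
    else lsiLoop cs line fuel (currentLine + 1) (newline + 1)

def line_start_index_py (text : String) (line : Int) : Int :=
  if line < 1 then 0          -- Python: raise EditApplyError (outside Pre_)
  else if line = 1 then 0
  else lsiLoop text.toList line (line - 1).toNat 1 0

-- ===== PORT B =====
def line_start_index_py_alt (text : String) (line : Int) : Int :=
  if line < 1 then 0          -- Python: raise EditApplyError (outside Pre_)
  else
    let starts := ((PySem.List.enumerate text.toList).foldl
        (fun acc p => if p.2 = '\n' then acc ++ [p.1 + 1] else acc) [(0 : Int)])
      ++ [(text.toList.length : Int)]
    if (starts.length : Int) < line then 0   -- Python: raise EditApplyError (outside Pre_)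
    else PySem.List.pyGetD starts (line - 1) 0

-- ===== PRECONDITION & SPEC =====
-- Pre_ excludes exactly the inputs on which A raises EditApplyError: line < 1, or line
-- beyond the one-past-the-last-line bound (number of '\n' + 2).
def Pre_line_start_index_py (text : String) (line : Int) : Prop :=
  1 ≤ line ∧ line ≤ (text.toList.count '\n' : Int) + 2
instance (text : String) (line : Int) : Decidable (Pre_line_start_index_py text line) := by
  unfold Pre_line_start_index_py; infer_instance

def pvWitness_line_start_index_py : String × Int := ("ab\ncd\n", 3)

def Spec_line_start_index_py (text : String) (line : Int) (out : Int) : Prop := out = line_start_index_py_alt text line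
instance (text : String) (line : Int) (out : Int) : Decidable (Spec_line_start_index_py text line out) := by unfold Spec_line_start_index_py; infer_instance

-- ===== CLAIM (what is proved, stated in full; the proofs are below) =====
def Claim_equal_line_start_index_py : Prop := ∀ (text : String) (line : Int), Dom_line_start_index_py text line → Pre_line_start_index_py text line → Spec_line_start_index_py text line (line_start_index_py text line)

-- ===== LEMMAS AND PROOFS =====

-- the table of line-start offsets (B's `starts` list, in filter/map form)
def nlTable (cs : List Char) : List Int :=
  ([(0 : Int)] ++ ((PySem.List.enumerate cs).filter (fun p => p.2 == '\n')).map (fun p => p.1 + 1))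
    ++ [(cs.length : Int)]

lemma starts_eq_nlTable (cs : List Char) :
    ((PySem.List.enumerate cs).foldl
        (fun acc p => if p.2 = '\n' then acc ++ [p.1 + 1] else acc) [(0 : Int)])
      ++ [(cs.length : Int)] = nlTable cs := by
  have h : (fun (acc : List Int) (p : Int × Char) => if p.2 = '\n' then acc ++ [p.1 + 1] else acc)
      = (fun acc p => if (fun q : Int × Char => q.2 == '\n') p = true then acc ++ [(fun q : Int × Char => q.1 + 1) p] else acc) := by
    funext acc p; by_cases h : p.2 = '\n' <;> simp [h]
  rw [h, PySem.List.foldl_append_if]; simp [nlTable]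

lemma enumerate_shift {α : Type} (xs : List α) (s : Int) :
    PySem.List.enumerate xs s = (PySem.List.enumerate xs 0).map (fun p => (p.1 + s, p.2)) := by
  induction xs generalizing s with
  | nil => simp [PySem.List.enumerate_nil]
  | cons x xs ih =>
    rw [PySem.List.enumerate_cons, PySem.List.enumerate_cons, ih (s+1)]
    simp only [zero_add]
    rw [ih 1, List.map_cons, List.map_map]
    congr 1
    · simp
    · apply List.map_congr_left; intro p _; simp; omega

lemma nlTable_cons (cs : List Char) :
    nlTable cs = 0 :: (((PySem.List.enumerate cs).filter (fun p => p.2 == '\n')).map (fun p => p.1 + 1)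
      ++ [(cs.length : Int)]) := by
  simp [nlTable]

lemma nlTable_no_nl {cs : List Char} (h : '\n' ∉ cs) : nlTable cs = [0, (cs.length : Int)] := by
  have hf : ((PySem.List.enumerate cs).filter (fun p => p.2 == '\n')) = [] := by
    rw [List.filter_eq_nil_iff]
    intro p hp
    obtain ⟨k, hk, rfl⟩ := (PySem.List.mem_enumerate_iff cs 0 p).mp hp
    simp only [beq_iff_eq]
    intro hc
    exact h (hc ▸ List.getElem_mem hk)
  simp [nlTable, hf]

lemma nlTable_split (a b : List Char) (h : '\n' ∉ a) :
    nlTable (a ++ '\n' :: b) = 0 :: (nlTable b).map (· + ((a.length : Int) + 1)) := by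
  have hfa : ((PySem.List.enumerate a).filter (fun p => p.2 == '\n')) = [] := by
    rw [List.filter_eq_nil_iff]
    intro p hp
    obtain ⟨k, hk, rfl⟩ := (PySem.List.mem_enumerate_iff a 0 p).mp hp
    simp only [beq_iff_eq]
    intro hc
    exact h (hc ▸ List.getElem_mem hk)
  rw [nlTable, PySem.List.enumerate_append, PySem.List.enumerate_cons,
    enumerate_shift b (0 + a.length + 1), List.filter_append, hfa]
  simp only [List.nil_append, List.filter_cons]
  norm_num
  rw [List.filter_map]
  simp only [nlTable, List.map_append, List.map_map, List.map_cons]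
  simp only [List.cons_append]
  simp only [List.map_nil, List.nil_append]
  congr 1
  · omega
  congr 1
  · apply List.map_congr_left; intro p _; simp [Function.comp]; omega
  · congr 1; omega

lemma filter_enumerate_len (cs : List Char) :
    ((PySem.List.enumerate cs).filter (fun p => p.2 == '\n')).length = cs.count '\n' := by
  rw [← List.countP_eq_length_filter, List.count]
  conv_rhs => rw [← PySem.List.map_snd_enumerate cs 0]
  rw [List.countP_map]
  rfl

lemma nlTable_length (cs : List Char) : (nlTable cs).length = cs.count '\n' + 2 := by
  simp [nlTable, filter_enumerate_len]

-- first-occurrence decomposition from Chars.find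
lemma find_decomp {cs : List Char} (h : 0 ≤ PySem.Chars.find cs ['\n']) :
    cs = cs.take (PySem.Chars.find cs ['\n']).toNat
          ++ '\n' :: cs.drop ((PySem.Chars.find cs ['\n']).toNat + 1)
      ∧ '\n' ∉ cs.take (PySem.Chars.find cs ['\n']).toNat
      ∧ (PySem.Chars.find cs ['\n']).toNat < cs.length := by
  obtain ⟨hpre, hmin⟩ := PySem.Chars.find_spec h
  set j := (PySem.Chars.find cs ['\n']).toNat with hj
  obtain ⟨t, ht⟩ := hpre
  have hlt : j < cs.length := by
    by_contra hge
    have : cs.drop j = [] := List.drop_eq_nil_of_le (by omega)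
    rw [this] at ht; simp at ht
  have hdrop : cs.drop j = '\n' :: cs.drop (j + 1) := by
    rw [ht.symm]
    simp only [List.singleton_append]
    congr 1
    have : (cs.drop j).tail = cs.drop (j + 1) := List.tail_drop
    rw [← this, ← ht]
    simp
  refine ⟨?_, ?_, hlt⟩
  · conv_lhs => rw [← List.take_append_drop j cs]
    rw [hdrop]
  · intro hmem
    obtain ⟨i, hi, hget⟩ := List.getElem_of_mem hmem
    have hil : i < j := by simp at hi; omega
    have : cs[i]'(by omega) = '\n' := by
      rw [← hget]; simp [List.getElem_take]
    apply hmin i hil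
    rw [List.drop_eq_getElem_cons (by omega), this]
    exact ⟨_, rfl⟩

-- A's loop computes a lookup into the line-start table of the dropped suffix
lemma lsiLoop_eq_table :
    ∀ (fuel : Nat) (cs : List Char) (line currentLine : Int) (idx : Nat),
      idx ≤ cs.length →
      line = currentLine + fuel →
      fuel < (nlTable (cs.drop idx)).length →
      lsiLoop cs line fuel currentLine (idx : Int)
        = (idx : Int) + (nlTable (cs.drop idx)).getD fuel 0 := by
  intro fuel
  induction fuel with
  | zero =>
    intro cs line currentLine idx _ _ _
    rw [nlTable_cons (cs.drop idx)]
    simp [lsiLoop]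
  | succ f ih =>
    intro cs line currentLine idx hidx hline hlen
    set d := cs.drop idx with hd
    have hdlen : d.length = cs.length - idx := by simp [hd]
    rw [lsiLoop]
    rw [PySem.Chars.findFrom_natCast cs ['\n'] idx hidx]
    by_cases hfind : PySem.Chars.find d ['\n'] = -1
    · -- no newline in the rest
      have hnl : '\n' ∉ d := by
        have := (PySem.Chars.find_eq_neg_one_iff d ['\n']).mp hfind
        intro hmem; exact this ((List.singleton_infix_iff '\n' d).mpr hmem)
      have htab : nlTable d = [0, (d.length : Int)] := nlTable_no_nl hnl
      rw [htab] at hlen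
      simp only [List.length_cons, List.length_nil] at hlen
      have hf0 : f = 0 := by omega
      subst hf0
      rw [← hd, hfind]
      simp only [if_pos (by omega : currentLine + 1 = line)]
      rw [htab]
      simp
      omega
    · -- a newline found at j
      have hge : 0 ≤ PySem.Chars.find d ['\n'] := by
        have := PySem.Chars.neg_one_le_find d ['\n']
        omega
      set j := (PySem.Chars.find d ['\n']).toNat with hjdef
      obtain ⟨hsplit, hnotin, hjlt⟩ := find_decomp hge
      have hjcast : PySem.Chars.find d ['\n'] = (j : Int) := by omega
      rw [← hd, if_neg (by rw [hjcast]; omega)]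
      have hidx' : idx + (j + 1) ≤ cs.length := by omega
      have hdropd : cs.drop (idx + (j + 1)) = d.drop (j + 1) := by
        rw [hd, List.drop_drop]
      have htab : nlTable d = 0 :: (nlTable (d.drop (j + 1))).map (· + ((j : Int) + 1)) := by
        conv_lhs => rw [hsplit]
        rw [nlTable_split _ _ hnotin]
        congr 2
        funext x
        congr 1
        simp
        omega
      have hlen' : f < (nlTable (d.drop (j + 1))).length := by
        rw [htab] at hlen
        simp at hlen
        omega
      have hrec := ih cs line (currentLine + 1) (idx + (j + 1)) hidx' (by omega)
        (by rw [hdropd]; exact hlen')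
      have harg : (idx : Int) + PySem.Chars.find d ['\n'] + 1 = ((idx + (j + 1) : Nat) : Int) := by
        rw [hjcast]; push_cast; omega
      rw [if_neg hfind, harg, hrec, hdropd, htab]
      have hmapD : ((nlTable (d.drop (j+1))).map (· + ((j:Int)+1))).getD f 0
          = (nlTable (d.drop (j+1))).getD f 0 + ((j:Int)+1) := by
        rw [List.getD_eq_getElem?_getD, List.getD_eq_getElem?_getD, List.getElem?_map]
        rw [List.getElem?_eq_getElem hlen']
        simp
      simp only [List.getD_cons_succ]
      rw [hmapD]
      push_cast
      omega

-- ===== VERDICT (by name: the statement is the Claim_ definition above) =====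
theorem line_start_index_py_spec : Claim_equal_line_start_index_py := by
  intro text line _hdom hpre
  obtain ⟨h1, h2⟩ := hpre
  unfold Spec_line_start_index_py
  have hB : line_start_index_py_alt text line
      = (nlTable text.toList).getD (line - 1).toNat 0 := by
    unfold line_start_index_py_alt
    rw [if_neg (by omega)]
    simp only [starts_eq_nlTable]
    rw [if_neg (by rw [nlTable_length]; push_cast; omega)]
    exact PySem.List.pyGetD_of_nonneg _ _ (by omega)
  rw [hB]
  unfold line_start_index_py
  rw [if_neg (by omega)]
  by_cases hl1 : line = 1
  · rw [if_pos hl1, hl1, nlTable_cons]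
    simp
  · rw [if_neg hl1]
    have hmain := lsiLoop_eq_table (line - 1).toNat text.toList line 1 0 (by omega)
      (by omega)
      (by rw [List.drop_zero, nlTable_length]; omega)
    rw [List.drop_zero] at hmain
    simpa using hmain
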